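-- pv_equiv track=rewrite | github.com/pilukarts/AIFinantialAnalysis | ai_financial_sentiment/ai_financial_sentiment/src/sentiment_analyzer.py | preprocess_text
-- ===== SOURCE A (Python) =====
-- def preprocess_text(text: str) -> str:
--     """Clean and preprocess financial text"""
--     if not isinstance(text, str):
--         return ""
--
--     # Basic cleaning
--     text = text.lower()
--     text = ' '.join(text.split())  # Remove extra whitespace
--
--     # Financial specific preprocessing
--     financial_abbreviations = {
--         'q1': 'quarter 1',
--         'q2': 'quarter 2',
--         'q3': 'quarter 3',
--         'q4': 'quarter 4',
--         'yoy': 'year over year',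
--         'qoq': 'quarter over quarter'
--     }
--
--     for abbr, full_form in financial_abbreviations.items():
--         text = text.replace(abbr, full_form)
--
--     return text
-- ===== SOURCE B (Python) =====
-- def preprocess_text(text: str) -> str:
--     """Clean and preprocess financial text (fused single-scan re-implementation)."""
--     if not isinstance(text, str):
--         return ""
--
--     text = ' '.join(text.lower().split())
--
--     # q1..q4 and yoy never overlap each other and their expansions never create a
--     # new occurrence, so A's five successive replace passes equal ONE left-to-right scan.
--     five = {
--         'q1': 'quarter 1',
--         'q2': 'quarter 2',
--         'q3': 'quarter 3',
--         'q4': 'quarter 4',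
--         'yoy': 'year over year',
--     }
--     out = []
--     i = 0
--     n = len(text)
--     while i < n:
--         for abbr, full in five.items():
--             if text.startswith(abbr, i):
--                 out.append(full)
--                 i += len(abbr)
--                 break
--         else:
--             out.append(text[i])
--             i += 1
--     # 'qoq' interacts with the expansions above, so it is replaced last, as in A.
--     return ''.join(out).replace('qoq', 'quarter over quarter')
-- ===== Notes on version B (the rewrite author's own statement) =====
-- stated objective: alternative
-- what changed: B fuses A's first five full-string str.replace passes (q1..q4, yoy, which never overlap each other and whose expansions create no new match) into one left-to-right index scan, followed by the single remaining qoq replace, so the text is traversed twice instead of six times.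
import Mathlib
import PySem

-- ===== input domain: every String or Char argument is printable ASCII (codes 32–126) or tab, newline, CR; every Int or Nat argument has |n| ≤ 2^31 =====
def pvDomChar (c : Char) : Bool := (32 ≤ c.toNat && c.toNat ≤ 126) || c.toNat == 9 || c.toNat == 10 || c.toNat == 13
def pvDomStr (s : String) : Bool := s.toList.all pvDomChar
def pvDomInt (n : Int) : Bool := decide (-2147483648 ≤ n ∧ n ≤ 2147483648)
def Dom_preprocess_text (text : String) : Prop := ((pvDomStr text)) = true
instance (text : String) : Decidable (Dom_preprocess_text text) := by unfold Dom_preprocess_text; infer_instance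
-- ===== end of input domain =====

-- B fuses A's first five full-string str.replace passes (q1..q4, yoy — mutually non-interacting)
-- into ONE left-to-right scan and keeps only the final interacting 'qoq' replace as a separate pass
-- (objective: alternative two-pass algorithm instead of six passes; same results on every input).

-- ===== PORT A =====
-- the 'if not isinstance(text, str)' guard of A cannot fire here: text : String by the type convention
def preprocess_text (text : String) : String :=
  let t1 := PySem.Str.lower text
  let t2 := PySem.Str.join " " (PySem.Str.split₀ t1)
  -- the dict literal has distinct keys, so iterating .items() visits exactly these pairs in insertion order
  [("q1", "quarter 1"), ("q2", "quarter 2"), ("q3", "quarter 3"), ("q4", "quarter 4"),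
   ("yoy", "year over year"), ("qoq", "quarter over quarter")].foldl
    (fun acc p => PySem.Str.replace acc p.1 p.2) t2

-- ===== PORT B =====
-- B's dict of the five mutually non-interacting abbreviations
def pvAbbrevs : List (List Char × List Char) :=
  [(['q', '1'], ['q', 'u', 'a', 'r', 't', 'e', 'r', ' ', '1']),
   (['q', '2'], ['q', 'u', 'a', 'r', 't', 'e', 'r', ' ', '2']),
   (['q', '3'], ['q', 'u', 'a', 'r', 't', 'e', 'r', ' ', '3']),
   (['q', '4'], ['q', 'u', 'a', 'r', 't', 'e', 'r', ' ', '4']),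
   (['y', 'o', 'y'], ['y', 'e', 'a', 'r', ' ', 'o', 'v', 'e', 'r', ' ', 'y', 'e', 'a', 'r'])]

-- B's while-loop over the index i: at each position emit the first matching expansion (advancing by the
-- abbreviation's length) or the single character
def pvScan : List Char → List Char
  | [] => []
  | c :: t =>
    match pvAbbrevs.find? (fun p => PySem.Chars.startswith (c :: t) p.1) with
    | some p => p.2 ++ pvScan (t.drop (p.1.length - 1))
    | none => c :: pvScan t
termination_by l => l.length
decreasing_by
  · simp only [List.length_cons, List.length_drop]
    omega
  · simp

def preprocess_text_alt (text : String) : String :=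
  let t1 := PySem.Str.lower text
  let t2 := PySem.Str.join " " (PySem.Str.split₀ t1)
  PySem.Str.replace (String.ofList (pvScan t2.toList)) "qoq" "quarter over quarter"

-- ===== PRECONDITION & SPEC =====

def Spec_preprocess_text (text : String) (out : String) : Prop :=
  out = preprocess_text_alt text
instance (text : String) (out : String) : Decidable (Spec_preprocess_text text out) := by
  unfold Spec_preprocess_text; infer_instance

-- ===== CLAIM (what is proved, stated in full; the proofs are below) =====
def Claim_equal_preprocess_text : Prop :=
  ∀ (text : String), Dom_preprocess_text text → Spec_preprocess_text text (preprocess_text text)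

-- ===== LEMMAS AND PROOFS =====

-- the lowercased, whitespace-normalized text (what both programs compute before expanding)
def pvNorm (u : List Char) : List Char :=
  PySem.Chars.join [' '] (PySem.Chars.split₀ (PySem.Chars.lower u))

-- the six key/value pairs, proof-side abbreviations
def pvK1 : List Char := ['q', '1']
def pvK2 : List Char := ['q', '2']
def pvK3 : List Char := ['q', '3']
def pvK4 : List Char := ['q', '4']
def pvK5 : List Char := ['y', 'o', 'y']
def pvK6 : List Char := ['q', 'o', 'q']
def pvV1 : List Char := ['q', 'u', 'a', 'r', 't', 'e', 'r', ' ', '1']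
def pvV2 : List Char := ['q', 'u', 'a', 'r', 't', 'e', 'r', ' ', '2']
def pvV3 : List Char := ['q', 'u', 'a', 'r', 't', 'e', 'r', ' ', '3']
def pvV4 : List Char := ['q', 'u', 'a', 'r', 't', 'e', 'r', ' ', '4']
def pvV5 : List Char := ['y', 'e', 'a', 'r', ' ', 'o', 'v', 'e', 'r', ' ', 'y', 'e', 'a', 'r']
def pvV6 : List Char := ['q', 'u', 'a', 'r', 't', 'e', 'r', ' ', 'o', 'v', 'e', 'r', ' ', 'q', 'u', 'a', 'r', 't', 'e', 'r']

-- A's first five pipeline stages on char lists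
def pvP1 (u : List Char) : List Char := PySem.Chars.replace u pvK1 pvV1
def pvP2 (u : List Char) : List Char := PySem.Chars.replace (pvP1 u) pvK2 pvV2
def pvP3 (u : List Char) : List Char := PySem.Chars.replace (pvP2 u) pvK3 pvV3
def pvP4 (u : List Char) : List Char := PySem.Chars.replace (pvP3 u) pvK4 pvV4
def pvP5 (u : List Char) : List Char := PySem.Chars.replace (pvP4 u) pvK5 pvV5

-- no occurrence of key k can start inside v and spill over its right end
def pvNoCross (k v : List Char) : Bool :=
  v.tails.all (fun ss => ss.isEmpty || !((k.take ss.length).isPrefixOf ss))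

-- ---- facts about PySem.Chars.replace ----
theorem pvGo_acc (old new : List Char) :
    ∀ (fuel : Nat) (l acc : List Char),
      PySem.Chars.replace.go old new fuel l acc =
        acc.reverse ++ PySem.Chars.replace.go old new fuel l [] := by
  intro fuel
  induction fuel with
  | zero => intro l acc; simp [PySem.Chars.replace.go]
  | succ f ih =>
    intro l acc
    cases l with
    | nil => simp [PySem.Chars.replace.go]
    | cons c t =>
      simp only [PySem.Chars.replace.go]
      by_cases h : old.isPrefixOf (c :: t)
      · simp only [h, if_true]
        rw [ih _ (new.reverse ++ acc), ih _ (new.reverse ++ [])]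
        simp
      · simp only [h, if_false, Bool.false_eq_true]
        rw [ih t (c :: acc), ih t (c :: [])]
        simp

theorem pvGo_fuel (old new : List Char) (hold : old ≠ []) :
    ∀ (fuel fuel' : Nat) (l : List Char), l.length ≤ fuel → l.length ≤ fuel' →
      PySem.Chars.replace.go old new fuel l [] = PySem.Chars.replace.go old new fuel' l [] := by
  intro fuel
  induction fuel with
  | zero =>
    intro fuel' l h h'
    have : l = [] := List.length_eq_zero_iff.mp (Nat.le_zero.mp h)
    subst this
    cases fuel' <;> simp [PySem.Chars.replace.go]
  | succ f ih =>
    intro fuel' l h h'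
    cases l with
    | nil => cases fuel' <;> simp [PySem.Chars.replace.go]
    | cons c t =>
      cases fuel' with
      | zero => simp at h'
      | succ f' =>
        have hol : 1 ≤ old.length := by
          cases old with
          | nil => exact absurd rfl hold
          | cons _ _ => simp
        simp only [PySem.Chars.replace.go]
        by_cases hp : old.isPrefixOf (c :: t)
        · simp only [hp, if_true]
          rw [pvGo_acc old new f, pvGo_acc old new f']
          rw [ih f' (List.drop old.length (c :: t))
            (by simp only [List.length_drop, List.length_cons] at *; omega)
            (by simp only [List.length_drop, List.length_cons] at *; omega)]
        · simp only [hp, if_false, Bool.false_eq_true]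
          rw [pvGo_acc old new f, pvGo_acc old new f']
          rw [ih f' t (by simp at h; omega) (by simp at h'; omega)]

theorem pvRep_nil (old new : List Char) (h : old ≠ []) :
    PySem.Chars.replace [] old new = [] := by
  simp [PySem.Chars.replace, PySem.Chars.replace.go, h]

theorem pvRep_head (old new t : List Char) (h : old ≠ []) :
    PySem.Chars.replace (old ++ t) old new = new ++ PySem.Chars.replace t old new := by
  obtain ⟨o, ot, rfl⟩ : ∃ o ot, old = o :: ot := by
    cases old with
    | nil => exact absurd rfl h
    | cons o ot => exact ⟨o, ot, rfl⟩
  have hpre : (o :: ot).isPrefixOf (o :: (ot ++ t)) = true :=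
    List.isPrefixOf_iff_prefix.mpr
      (by rw [show o :: (ot ++ t) = (o :: ot) ++ t from rfl]; exact List.prefix_append _ _)
  have hd : List.drop (ot.length + 1) (o :: (ot ++ t)) = t := by
    simp
  simp only [PySem.Chars.replace, PySem.Chars.replace.go, List.isEmpty_cons, Bool.false_eq_true,
    if_false, List.cons_append, List.length_cons, List.length_append]
  rw [if_pos hpre, hd, pvGo_acc]
  simp only [List.append_nil, List.reverse_reverse]
  rw [pvGo_fuel (o :: ot) new h (ot.length + t.length) t.length t (by omega) le_rfl]

theorem pvRep_cons (old new : List Char) (c : Char) (t : List Char) (h : old ≠ [])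
    (hp : ¬ old <+: (c :: t)) :
    PySem.Chars.replace (c :: t) old new = c :: PySem.Chars.replace t old new := by
  have hp' : old.isPrefixOf (c :: t) = false := by
    rw [← Bool.not_eq_true, List.isPrefixOf_iff_prefix]; exact hp
  obtain ⟨o, ot, rfl⟩ : ∃ o ot, old = o :: ot := by
    cases old with
    | nil => exact absurd rfl h
    | cons o ot => exact ⟨o, ot, rfl⟩
  simp only [PySem.Chars.replace, PySem.Chars.replace.go, List.isEmpty_cons, Bool.false_eq_true,
    if_false, List.length_cons, hp']
  rw [pvGo_acc]
  simp

theorem pvPrefix_take {k v X : List Char} (h : k <+: (v ++ X)) :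
    (k.take v.length) <+: v := by
  obtain ⟨r, hr⟩ := h
  have hv : v = (k ++ r).take v.length := by rw [hr]; exact (List.take_left).symm
  conv_rhs => rw [hv]
  rw [List.take_append]
  exact List.prefix_append _ _

theorem pvRep_push (k new : List Char) (hk : k ≠ []) :
    ∀ (v : List Char), pvNoCross k v = true →
      ∀ X, PySem.Chars.replace (v ++ X) k new = v ++ PySem.Chars.replace X k new := by
  intro v
  induction v with
  | nil => intro _ X; simp
  | cons c vt ih =>
    intro h X
    have hall := List.all_eq_true.mp h
    have hnp : ¬ k <+: (c :: (vt ++ X)) := by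
      intro hp
      have h0 := hall (c :: vt) ((List.mem_tails _ _).mpr (List.suffix_refl _))
      simp only [List.isEmpty_cons, Bool.false_or, Bool.not_eq_eq_eq_not, Bool.not_true] at h0
      have hp' : k <+: ((c :: vt) ++ X) := by simpa using hp
      have hpt := List.isPrefixOf_iff_prefix.mpr (pvPrefix_take hp')
      simp only [List.length_cons] at hpt h0
      rw [hpt] at h0
      simp at h0
    have ht : pvNoCross k vt = true := by
      apply List.all_eq_true.mpr
      intro ss hss
      exact hall ss (by rw [List.tails_cons]; exact List.mem_cons_of_mem _ hss)
    calc PySem.Chars.replace ((c :: vt) ++ X) k new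
        = PySem.Chars.replace (c :: (vt ++ X)) k new := by rw [List.cons_append]
      _ = c :: PySem.Chars.replace (vt ++ X) k new := pvRep_cons k new c _ hk hnp
      _ = c :: (vt ++ PySem.Chars.replace X k new) := by rw [ih ht X]
      _ = (c :: vt) ++ PySem.Chars.replace X k new := by simp

theorem pvHead?_of_prefix {a : Char} {l x : List Char} (h : (a :: l) <+: x) :
    x.head? = some a := by
  obtain ⟨r, rfl⟩ := h
  rfl

-- pushing a replace past a head char that is not the key's first char
theorem pvRep_cons_ne (k v : List Char) (k0 : Char) (hk : k.head? = some k0) (c : Char)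
    (hc : c ≠ k0) (t : List Char) :
    PySem.Chars.replace (c :: t) k v = c :: PySem.Chars.replace t k v := by
  obtain ⟨kt, rfl⟩ : ∃ kt, k = k0 :: kt := by
    cases k with
    | nil => simp at hk
    | cons a b => simp at hk; exact ⟨b, by rw [hk]⟩
  exact pvRep_cons _ _ _ _ (by simp) (by
    intro hp
    rw [List.cons_prefix_cons] at hp
    exact hc hp.1.symm)

-- a replace whose value starts with the key's first char preserves the head character
theorem pvHead_replace (k v : List Char) (hk : k ≠ []) (hv : v.head? = k.head?) :
    ∀ t, (PySem.Chars.replace t k v).head? = t.head? := by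
  intro t
  cases t with
  | nil => rw [pvRep_nil _ _ hk]
  | cons c t' =>
    by_cases hp : k <+: (c :: t')
    · obtain ⟨r, hr⟩ := hp
      obtain ⟨k0, kt, rfl⟩ : ∃ k0 kt, k = k0 :: kt := by
        cases k with
        | nil => exact absurd rfl hk
        | cons a b => exact ⟨a, b, rfl⟩
      have hk0 : k0 = c := by
        have := congrArg List.head? hr
        simpa using this
      rw [← hr, pvRep_head _ _ _ hk]
      cases v with
      | nil => simp at hv
      | cons v0 vt =>
        simp at hv
        simp [hv, hk0]
    · rw [pvRep_cons _ _ _ _ hk hp]; rfl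

theorem pvScan_nil : pvScan [] = [] := by rw [pvScan]

-- ---- head preservation through A's stages ----
theorem pvP1_head? (t : List Char) : (pvP1 t).head? = t.head? :=
  pvHead_replace pvK1 pvV1 (by simp [pvK1]) rfl t
theorem pvP2_head? (t : List Char) : (pvP2 t).head? = t.head? := by
  rw [pvP2, pvHead_replace pvK2 pvV2 (by simp [pvK2]) rfl, pvP1_head?]
theorem pvP3_head? (t : List Char) : (pvP3 t).head? = t.head? := by
  rw [pvP3, pvHead_replace pvK3 pvV3 (by simp [pvK3]) rfl, pvP2_head?]
theorem pvP4_head? (t : List Char) : (pvP4 t).head? = t.head? := by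
  rw [pvP4, pvHead_replace pvK4 pvV4 (by simp [pvK4]) rfl, pvP3_head?]

-- ---- pushing A's stages past a leading 'o' (no key starts with 'o') ----
theorem pvP1_cons_o (x : List Char) : pvP1 ('o' :: x) = 'o' :: pvP1 x :=
  pvRep_cons_ne pvK1 pvV1 'q' rfl 'o' (by decide) x
theorem pvP2_cons_o (x : List Char) : pvP2 ('o' :: x) = 'o' :: pvP2 x := by
  rw [pvP2, pvP1_cons_o, pvRep_cons_ne pvK2 pvV2 'q' rfl 'o' (by decide)]; rfl
theorem pvP3_cons_o (x : List Char) : pvP3 ('o' :: x) = 'o' :: pvP3 x := by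
  rw [pvP3, pvP2_cons_o, pvRep_cons_ne pvK3 pvV3 'q' rfl 'o' (by decide)]; rfl
theorem pvP4_cons_o (x : List Char) : pvP4 ('o' :: x) = 'o' :: pvP4 x := by
  rw [pvP4, pvP3_cons_o, pvRep_cons_ne pvK4 pvV4 'q' rfl 'o' (by decide)]; rfl

-- when no abbreviation matches at the head, all five stages step past one character
theorem pvP5_cons_safe (c : Char) (t : List Char)
    (h1 : ¬ (pvK1 <+: (c :: t))) (h2 : ¬ (pvK2 <+: (c :: t))) (h3 : ¬ (pvK3 <+: (c :: t)))
    (h4 : ¬ (pvK4 <+: (c :: t))) (h5 : ¬ (pvK5 <+: (c :: t))) :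
    pvP5 (c :: t) = c :: pvP5 t := by
  have digitStep : ∀ (d : Char) (hK : ¬ (('q' :: d :: []) <+: (c :: t))) (X : List Char)
      (hX : X.head? = t.head?), ¬ (('q' :: d :: []) <+: (c :: X)) := by
    intro d hK X hX hp
    rw [List.cons_prefix_cons] at hp
    obtain ⟨hc, hp2⟩ := hp
    have hh := pvHead?_of_prefix hp2
    rw [hX] at hh
    cases t with
    | nil => simp at hh
    | cons t0 t1 =>
      simp at hh
      subst hh
      subst hc
      exact hK (by simp [List.cons_prefix_cons])
  have n2 : ¬ (pvK2 <+: (c :: pvP1 t)) := digitStep '2' h2 _ (pvP1_head? t)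
  have n3 : ¬ (pvK3 <+: (c :: pvP2 t)) := digitStep '3' h3 _ (pvP2_head? t)
  have n4 : ¬ (pvK4 <+: (c :: pvP3 t)) := digitStep '4' h4 _ (pvP3_head? t)
  have n5 : ¬ (pvK5 <+: (c :: pvP4 t)) := by
    intro hp
    simp only [pvK5, List.cons_prefix_cons] at hp
    obtain ⟨hc, hp2⟩ := hp
    have hh := pvHead?_of_prefix (by simpa using hp2)
    rw [pvP4_head?] at hh
    cases t with
    | nil => simp at hh
    | cons t0 t1 =>
      simp at hh
      subst hh
      rw [pvP4_cons_o, List.cons_prefix_cons] at hp2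
      have hh2 := pvHead?_of_prefix (by simpa using hp2.2)
      rw [pvP4_head?] at hh2
      cases t1 with
      | nil => simp at hh2
      | cons s0 s1 =>
        simp at hh2
        subst hh2
        subst hc
        exact h5 (by simp [pvK5, List.cons_prefix_cons])
  have s1 : pvP1 (c :: t) = c :: pvP1 t := pvRep_cons _ _ _ _ (by simp [pvK1]) h1
  have s2 : pvP2 (c :: t) = c :: pvP2 t := by
    rw [pvP2, s1, pvRep_cons _ _ _ _ (by simp [pvK2]) n2]; rfl
  have s3 : pvP3 (c :: t) = c :: pvP3 t := by
    rw [pvP3, s2, pvRep_cons _ _ _ _ (by simp [pvK3]) n3]; rfl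
  have s4 : pvP4 (c :: t) = c :: pvP4 t := by
    rw [pvP4, s3, pvRep_cons _ _ _ _ (by simp [pvK4]) n4]; rfl
  rw [pvP5, s4, pvRep_cons _ _ _ _ (by simp [pvK5]) n5]; rfl

-- ---- scan equations ----
theorem pvScan_k1 (t : List Char) : pvScan ('q' :: '1' :: t) = pvV1 ++ pvScan t := by
  rw [pvScan]; rfl
theorem pvScan_k2 (t : List Char) : pvScan ('q' :: '2' :: t) = pvV2 ++ pvScan t := by
  rw [pvScan]; rfl
theorem pvScan_k3 (t : List Char) : pvScan ('q' :: '3' :: t) = pvV3 ++ pvScan t := by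
  rw [pvScan]; rfl
theorem pvScan_k4 (t : List Char) : pvScan ('q' :: '4' :: t) = pvV4 ++ pvScan t := by
  rw [pvScan]; rfl
theorem pvScan_k5 (t : List Char) : pvScan ('y' :: 'o' :: 'y' :: t) = pvV5 ++ pvScan t := by
  rw [pvScan]; rfl
theorem pvScan_none (c : Char) (t : List Char)
    (h : pvAbbrevs.find? (fun p => PySem.Chars.startswith (c :: t) p.1) = none) :
    pvScan (c :: t) = c :: pvScan t := by
  rw [pvScan, h]

-- ---- the main equivalence on char lists: A's first five passes = B's fused scan ----
theorem pvMain : ∀ (n : Nat) (u : List Char), u.length ≤ n → pvP5 u = pvScan u := by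
  intro n
  induction n with
  | zero =>
    intro u hlen
    have hu : u = [] := List.length_eq_zero_iff.mp (Nat.le_zero.mp hlen)
    subst hu
    rw [pvScan_nil]
    decide
  | succ n ih =>
    intro u hlen
    cases hfind : pvAbbrevs.find? (fun p => PySem.Chars.startswith u p.1) with
    | none =>
      cases u with
      | nil => rw [pvScan_nil]; decide
      | cons c t =>
        have hs := List.find?_eq_none.mp hfind
        have get : ∀ (k v : List Char), (k, v) ∈ pvAbbrevs → ¬ (k <+: (c :: t)) := by
          intro k v hm hp
          have hkv := hs (k, v) hm
          simp only [PySem.Chars.startswith] at hkv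
          exact hkv (List.isPrefixOf_iff_prefix.mpr hp)
        have h1 := get pvK1 pvV1 (by simp [pvAbbrevs, pvK1, pvV1])
        have h2 := get pvK2 pvV2 (by simp [pvAbbrevs, pvK2, pvV2])
        have h3 := get pvK3 pvV3 (by simp [pvAbbrevs, pvK3, pvV3])
        have h4 := get pvK4 pvV4 (by simp [pvAbbrevs, pvK4, pvV4])
        have h5 := get pvK5 pvV5 (by simp [pvAbbrevs, pvK5, pvV5])
        rw [pvP5_cons_safe c t h1 h2 h3 h4 h5, pvScan_none c t hfind,
          ih t (by simp at hlen; omega)]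
    | some p =>
      have hmem := List.mem_of_find?_eq_some hfind
      have hpre : p.1 <+: u := by
        have hps := List.find?_some hfind
        simp only [PySem.Chars.startswith] at hps
        exact List.isPrefixOf_iff_prefix.mp hps
      obtain ⟨rest, hrest⟩ := hpre
      simp only [pvAbbrevs, List.mem_cons, List.not_mem_nil, or_false] at hmem
      have hlrest : rest.length ≤ n := by
        have hl := congrArg List.length hrest
        rcases hmem with h | h | h | h | h <;> subst h <;>
          simp at hl <;> omega
      rcases hmem with h | h | h | h | h <;> subst h <;> rw [← hrest]
      · -- q1
        show pvP5 (pvK1 ++ rest) = pvScan (pvK1 ++ rest)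
        have e1 : pvP1 (pvK1 ++ rest) = pvV1 ++ pvP1 rest := pvRep_head _ _ _ (by simp [pvK1])
        have e2 : pvP2 (pvK1 ++ rest) = pvV1 ++ pvP2 rest := by
          rw [pvP2, e1, pvRep_push pvK2 pvV2 (by simp [pvK2]) pvV1 (by decide)]; rfl
        have e3 : pvP3 (pvK1 ++ rest) = pvV1 ++ pvP3 rest := by
          rw [pvP3, e2, pvRep_push pvK3 pvV3 (by simp [pvK3]) pvV1 (by decide)]; rfl
        have e4 : pvP4 (pvK1 ++ rest) = pvV1 ++ pvP4 rest := by
          rw [pvP4, e3, pvRep_push pvK4 pvV4 (by simp [pvK4]) pvV1 (by decide)]; rfl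
        have e5 : pvP5 (pvK1 ++ rest) = pvV1 ++ pvP5 rest := by
          rw [pvP5, e4, pvRep_push pvK5 pvV5 (by simp [pvK5]) pvV1 (by decide)]; rfl
        rw [e5, show (pvK1 ++ rest : List Char) = 'q' :: '1' :: rest from rfl, pvScan_k1,
          ih rest hlrest]
      · -- q2
        show pvP5 (pvK2 ++ rest) = pvScan (pvK2 ++ rest)
        have e1 : pvP1 (pvK2 ++ rest) = pvK2 ++ pvP1 rest :=
          pvRep_push pvK1 pvV1 (by simp [pvK1]) pvK2 (by decide) rest
        have e2 : pvP2 (pvK2 ++ rest) = pvV2 ++ pvP2 rest := by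
          rw [pvP2, e1, pvRep_head _ _ _ (by simp [pvK2])]; rfl
        have e3 : pvP3 (pvK2 ++ rest) = pvV2 ++ pvP3 rest := by
          rw [pvP3, e2, pvRep_push pvK3 pvV3 (by simp [pvK3]) pvV2 (by decide)]; rfl
        have e4 : pvP4 (pvK2 ++ rest) = pvV2 ++ pvP4 rest := by
          rw [pvP4, e3, pvRep_push pvK4 pvV4 (by simp [pvK4]) pvV2 (by decide)]; rfl
        have e5 : pvP5 (pvK2 ++ rest) = pvV2 ++ pvP5 rest := by
          rw [pvP5, e4, pvRep_push pvK5 pvV5 (by simp [pvK5]) pvV2 (by decide)]; rfl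
        rw [e5, show (pvK2 ++ rest : List Char) = 'q' :: '2' :: rest from rfl, pvScan_k2,
          ih rest hlrest]
      · -- q3
        show pvP5 (pvK3 ++ rest) = pvScan (pvK3 ++ rest)
        have e1 : pvP1 (pvK3 ++ rest) = pvK3 ++ pvP1 rest :=
          pvRep_push pvK1 pvV1 (by simp [pvK1]) pvK3 (by decide) rest
        have e2 : pvP2 (pvK3 ++ rest) = pvK3 ++ pvP2 rest := by
          rw [pvP2, e1, pvRep_push pvK2 pvV2 (by simp [pvK2]) pvK3 (by decide)]; rfl
        have e3 : pvP3 (pvK3 ++ rest) = pvV3 ++ pvP3 rest := by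
          rw [pvP3, e2, pvRep_head _ _ _ (by simp [pvK3])]; rfl
        have e4 : pvP4 (pvK3 ++ rest) = pvV3 ++ pvP4 rest := by
          rw [pvP4, e3, pvRep_push pvK4 pvV4 (by simp [pvK4]) pvV3 (by decide)]; rfl
        have e5 : pvP5 (pvK3 ++ rest) = pvV3 ++ pvP5 rest := by
          rw [pvP5, e4, pvRep_push pvK5 pvV5 (by simp [pvK5]) pvV3 (by decide)]; rfl
        rw [e5, show (pvK3 ++ rest : List Char) = 'q' :: '3' :: rest from rfl, pvScan_k3,
          ih rest hlrest]
      · -- q4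
        show pvP5 (pvK4 ++ rest) = pvScan (pvK4 ++ rest)
        have e1 : pvP1 (pvK4 ++ rest) = pvK4 ++ pvP1 rest :=
          pvRep_push pvK1 pvV1 (by simp [pvK1]) pvK4 (by decide) rest
        have e2 : pvP2 (pvK4 ++ rest) = pvK4 ++ pvP2 rest := by
          rw [pvP2, e1, pvRep_push pvK2 pvV2 (by simp [pvK2]) pvK4 (by decide)]; rfl
        have e3 : pvP3 (pvK4 ++ rest) = pvK4 ++ pvP3 rest := by
          rw [pvP3, e2, pvRep_push pvK3 pvV3 (by simp [pvK3]) pvK4 (by decide)]; rfl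
        have e4 : pvP4 (pvK4 ++ rest) = pvV4 ++ pvP4 rest := by
          rw [pvP4, e3, pvRep_head _ _ _ (by simp [pvK4])]; rfl
        have e5 : pvP5 (pvK4 ++ rest) = pvV4 ++ pvP5 rest := by
          rw [pvP5, e4, pvRep_push pvK5 pvV5 (by simp [pvK5]) pvV4 (by decide)]; rfl
        rw [e5, show (pvK4 ++ rest : List Char) = 'q' :: '4' :: rest from rfl, pvScan_k4,
          ih rest hlrest]
      · -- yoy
        show pvP5 (pvK5 ++ rest) = pvScan (pvK5 ++ rest)
        have e1 : pvP1 (pvK5 ++ rest) = pvK5 ++ pvP1 rest :=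
          pvRep_push pvK1 pvV1 (by simp [pvK1]) pvK5 (by decide) rest
        have e2 : pvP2 (pvK5 ++ rest) = pvK5 ++ pvP2 rest := by
          rw [pvP2, e1, pvRep_push pvK2 pvV2 (by simp [pvK2]) pvK5 (by decide)]; rfl
        have e3 : pvP3 (pvK5 ++ rest) = pvK5 ++ pvP3 rest := by
          rw [pvP3, e2, pvRep_push pvK3 pvV3 (by simp [pvK3]) pvK5 (by decide)]; rfl
        have e4 : pvP4 (pvK5 ++ rest) = pvK5 ++ pvP4 rest := by
          rw [pvP4, e3, pvRep_push pvK4 pvV4 (by simp [pvK4]) pvK5 (by decide)]; rfl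
        have e5 : pvP5 (pvK5 ++ rest) = pvV5 ++ pvP5 rest := by
          rw [pvP5, e4, pvRep_head _ _ _ (by simp [pvK5])]; rfl
        rw [e5, show (pvK5 ++ rest : List Char) = 'y' :: 'o' :: 'y' :: rest from rfl, pvScan_k5,
          ih rest hlrest]

-- ---- bridges from the String-level ports to the char-list computations ----
theorem pvNorm_toList (s : String) :
    (PySem.Str.join " " (PySem.Str.split₀ (PySem.Str.lower s))).toList = pvNorm s.toList := by
  rw [pvNorm, PySem.Str.toList_join, PySem.Str.split₀_map_toList, PySem.Str.toList_lower,
    show (" " : String).toList = [' '] from rfl]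

theorem pvBridgeA (text : String) :
    (preprocess_text text).toList =
      PySem.Chars.replace (pvP5 (pvNorm text.toList)) pvK6 pvV6 := by
  simp only [preprocess_text, List.foldl_cons, List.foldl_nil, PySem.Str.toList_replace,
    pvNorm_toList]
  rfl

theorem pvBridgeB (text : String) :
    (preprocess_text_alt text).toList =
      PySem.Chars.replace (pvScan (pvNorm text.toList)) pvK6 pvV6 := by
  simp only [preprocess_text_alt, PySem.Str.toList_replace, String.toList_ofList, pvNorm_toList]
  rfl

-- ===== VERDICT (by name: the statement is the Claim_ definition above) =====
theorem preprocess_text_spec : Claim_equal_preprocess_text := by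
  intro text _hdom
  unfold Spec_preprocess_text
  apply String.toList_inj.mp
  rw [pvBridgeA, pvBridgeB, pvMain (pvNorm text.toList).length _ le_rfl]
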